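-- pv_equiv track=rewrite | github.com/da-in/algorithm-study | Programmers - 문제풀이/디펜스 게임/jamin.py | solution
-- ===== SOURCE A (Python) =====
-- from heapq import heappop, heappush
--
-- def solution(n, k, enemy):
--     answer = 0
--     num = 0 #죽인 병사
--     heap = []
--
--     for i,e in enumerate(enemy):
--         num += e
--         heappush(heap, -e)
--         if num > n:
--             if k==0:
--                 break
--             num += heappop(heap)  #죽인 병사 줄어듬
--             k -= 1
--         answer = i+ 1
--     return answer
-- ===== SOURCE B (Python) =====
-- def solution(n, k, enemy):
--     total, alive, j, m = 0, [], 0, len(enemy)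
--     while True:
--         # advance until the running total overflows
--         while j < m:
--             total += enemy[j]
--             alive.append(enemy[j])
--             if total > n:
--                 break
--             j += 1
--         else:
--             return m              # no further overflow: survive every round
--         if k == 0:
--             return j              # no skip left: the overflowing round is lost
--         big = max(alive)          # skip the largest enemy absorbed so far
--         alive.remove(big)
--         total -= big
--         k -= 1
--         j += 1
-- ===== Notes on version B (the rewrite author's own statement) =====
-- stated objective: alternative
-- what changed: B drops the heap entirely: instead of A's single pass that pushes every enemy onto a max-heap and undoes overflows via heappop with a k-counter, B runs an outer loop over skip events whose heapless inner scan advances the index until the running total overflows, then removes the largest absorbed enemy by a direct max()/remove() search and resumes.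
import Mathlib
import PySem

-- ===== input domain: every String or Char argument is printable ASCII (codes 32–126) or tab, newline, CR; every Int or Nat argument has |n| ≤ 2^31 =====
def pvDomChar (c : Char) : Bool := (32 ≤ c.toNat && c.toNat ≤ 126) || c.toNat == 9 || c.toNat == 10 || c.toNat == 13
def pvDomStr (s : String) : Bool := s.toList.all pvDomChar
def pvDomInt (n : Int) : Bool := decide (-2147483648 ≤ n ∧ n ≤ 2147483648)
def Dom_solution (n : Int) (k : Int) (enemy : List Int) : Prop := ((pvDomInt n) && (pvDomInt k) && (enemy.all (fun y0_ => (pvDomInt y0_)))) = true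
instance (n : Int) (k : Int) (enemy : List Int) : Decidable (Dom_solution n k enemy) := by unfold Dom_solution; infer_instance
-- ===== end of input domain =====

-- B replaces A's single heap-based loop (max-heap of all enemies, undo via heappop, k-counter)
-- by an outer loop over skip events with a heapless inner scan that advances until the running
-- total overflows, then removes the largest absorbed enemy by direct max/remove search;
-- objective: alternative structure (no heap at all); B trades the heap for linear max/remove searches per skip.

-- ===== PORT A =====
-- heapq is modelled by its observable values: heappush appends, heappop removes and returns
-- the heap's minimum (first occurrence). Exact: heappop returns the minimum of the stored
-- multiset, and all later observable values depend only on that multiset.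
def pyHeapPush (h : List Int) (x : Int) : List Int := h ++ [x]

def pyHeapPop (h : List Int) : Int × List Int :=
  match PySem.List.min? h (fun y => y) with
  | some m => (m, (PySem.List.remove? h m).getD h)
  | none => (0, h)  -- unreachable: A pops only just-pushed (nonempty) heaps

def solutionLoop (n : Int) (i : Int) (answer : Int) (num : Int) (heap : List Int) (k : Int) : List Int → Int
  | [] => answer
  | e :: rest =>
    let num1 := num + e
    let heap1 := pyHeapPush heap (-e)
    if num1 > n then
      if k = 0 then answer
      else
        let p := pyHeapPop heap1
        solutionLoop n (i + 1) (i + 1) (num1 + p.1) p.2 (k - 1) rest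
    else
      solutionLoop n (i + 1) (i + 1) num1 heap1 k rest

def solution (n : Int) (k : Int) (enemy : List Int) : Int :=
  solutionLoop n 0 0 0 [] k enemy

-- ===== PORT B =====
-- inner scan: advance until the running total overflows; returns none if the list is
-- exhausted without overflow, else (overflow index, total, alive list, remaining suffix)
def bAdvance (n : Int) (j : Int) (total : Int) (alive : List Int) : List Int → Option (Int × Int × List Int × List Int)
  | [] => none
  | e :: rest =>
    let total1 := total + e
    let alive1 := alive ++ [e]
    if total1 > n then some (j, total1, alive1, rest)
    else bAdvance n (j + 1) total1 alive1 rest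

lemma bAdvance_rest_length (n : Int) :
    ∀ (l : List Int) (j total : Int) (alive : List Int) (r : Int × Int × List Int × List Int),
      bAdvance n j total alive l = some r → r.2.2.2.length < l.length := by
  intro l
  induction l with
  | nil => intro j total alive r h; simp [bAdvance] at h
  | cons e rest ih =>
    intro j total alive r h
    simp only [bAdvance] at h
    split at h
    · cases h; simp
    · exact Nat.lt_trans (ih _ _ _ r h) (by simp)

-- outer loop: one iteration per skip event (Python: `while True` around the inner scan)
def bOuter (n : Int) (k : Int) (j : Int) (total : Int) (alive : List Int) (l : List Int) (m : Int) : Int :=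
  match hadv : bAdvance n j total alive l with
  | none => m
  | some (j', total1, alive1, rest) =>
    if k = 0 then j'
    else
      match PySem.List.max? alive1 (fun y => y) with
      | some big =>
        bOuter n (k - 1) (j' + 1) (total1 - big) ((PySem.List.remove? alive1 big).getD alive1) rest m
      | none => j'  -- unreachable: alive1 is nonempty (the overflowing enemy was just appended)
  termination_by l.length
  decreasing_by exact bAdvance_rest_length n l j total alive _ hadv

def solution_alt (n : Int) (k : Int) (enemy : List Int) : Int :=
  bOuter n k 0 0 [] enemy (Int.ofNat enemy.length)

-- ===== PRECONDITION & SPEC =====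
def Spec_solution (n : Int) (k : Int) (enemy : List Int) (out : Int) : Prop := out = solution_alt n k enemy
instance (n : Int) (k : Int) (enemy : List Int) (out : Int) : Decidable (Spec_solution n k enemy out) := by unfold Spec_solution; infer_instance

-- ===== CLAIM (what is proved, stated in full; the proofs are below) =====
def Claim_equal_solution : Prop := ∀ (n : Int) (k : Int) (enemy : List Int), Dom_solution n k enemy → Spec_solution n k enemy (solution n k enemy)

-- ===== LEMMAS AND PROOFS =====

-- non-dependent unfolding of bOuter (its defining match names the scrutinee for termination)
lemma bOuter_eq (n k j total : Int) (alive l : List Int) (m : Int) :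
    bOuter n k j total alive l m =
      match bAdvance n j total alive l with
      | none => m
      | some (j', total1, alive1, rest) =>
        if k = 0 then j'
        else
          match PySem.List.max? alive1 (fun y => y) with
          | some big =>
            bOuter n (k - 1) (j' + 1) (total1 - big) ((PySem.List.remove? alive1 big).getD alive1) rest m
          | none => j' := by
  rw [bOuter]
  split <;> rename_i heq <;> rw [heq]

-- folding `min` over negated values is the negation of folding `max`
lemma foldl_min_neg (t : List Int) : ∀ x : Int, (t.map (fun y => -y)).foldl min (-x) = -(t.foldl max x) := by
  induction t with
  | nil => intro x; rfl
  | cons a t ih =>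
    intro x
    simp only [List.map, List.foldl]
    rw [show min (-x) (-a) = -(max x a) by omega]
    exact ih (max x a)

lemma min?_map_neg (l : List Int) :
    PySem.List.min? (l.map (fun y => -y)) (fun y => y) = (PySem.List.max? l (fun y => y)).map (fun y => -y) := by
  cases l with
  | nil => rfl
  | cons x t =>
    simp only [List.map, PySem.List.min?_id_cons, PySem.List.max?_id_cons, Option.map_some]
    rw [foldl_min_neg]

lemma remove?_map_neg (b : Int) : ∀ (l : List Int),
    PySem.List.remove? (l.map (fun y => -y)) (-b) = (PySem.List.remove? l b).map (List.map (fun y => -y)) := by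
  intro l
  induction l with
  | nil => rfl
  | cons x t ih =>
    by_cases hx : x = b
    · subst hx; simp [PySem.List.remove?_cons_self]
    · rw [List.map, PySem.List.remove?_cons_of_ne _ (show (-x : Int) ≠ -b by omega),
          PySem.List.remove?_cons_of_ne _ hx, ih]
      cases PySem.List.remove? t b <;> rfl

-- one overflow-handling step: popping A's negated heap is negating B's max/remove step
lemma pop_neg_step (alive1 : List Int) (big : Int)
    (hmax : PySem.List.max? alive1 (fun y => y) = some big) :
    pyHeapPop (alive1.map (fun y => -y)) = (-big, ((PySem.List.remove? alive1 big).getD alive1).map (fun y => -y)) := by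
  unfold pyHeapPop
  rw [min?_map_neg, hmax]
  simp only [Option.map_some]
  rw [remove?_map_neg]
  have hb : big ∈ alive1 := PySem.List.max?_mem hmax
  obtain ⟨r, hr⟩ : ∃ r, PySem.List.remove? alive1 big = some r := by
    cases h : PySem.List.remove? alive1 big with
    | some r => exact ⟨r, rfl⟩
    | none => exact absurd ((PySem.List.remove?_eq_none_iff _ _).mp h) (by simp [hb])
  simp [hr]

-- main invariant: A's flat loop with heap = alive.map(-·) is B's outer/inner loop pair
lemma loop_eq_bOuter (n : Int) :
    ∀ (l : List Int) (i num : Int) (alive : List Int) (k : Int),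
      solutionLoop n i i num (alive.map (fun y => -y)) k l = bOuter n k i num alive l (i + Int.ofNat l.length) := by
  intro l
  induction l with
  | nil =>
    intro i num alive k
    rw [bOuter_eq]
    simp [solutionLoop, bAdvance]
  | cons e rest ih =>
    intro i num alive k
    rw [bOuter_eq]
    simp only [solutionLoop, bAdvance, pyHeapPush]
    have hmapapp : alive.map (fun y => -y) ++ [-e] = (alive ++ [e]).map (fun y => -y) := by simp
    have hlen : i + 1 + Int.ofNat rest.length = i + Int.ofNat (e :: rest).length := by
      simp only [List.length_cons, Int.ofNat_eq_natCast]; push_cast; ring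
    by_cases hov : num + e > n
    · simp only [if_pos hov]
      by_cases hk : k = 0
      · simp [hk]
      · simp only [if_neg hk]
        obtain ⟨big, hmax⟩ : ∃ big, PySem.List.max? (alive ++ [e]) (fun y => y) = some big := by
          cases h : PySem.List.max? (alive ++ [e]) (fun y => y) with
          | some b => exact ⟨b, rfl⟩
          | none => exact absurd ((PySem.List.max?_eq_none_iff _ _).mp h) (by simp)
        rw [hmapapp, pop_neg_step _ _ hmax, hmax]
        have := ih (i + 1) (num + e + -big) ((PySem.List.remove? (alive ++ [e]) big).getD (alive ++ [e])) (k - 1)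
        rw [hlen] at this
        simpa [show num + e + -big = num + e - big by ring] using this
    · simp only [if_neg hov]
      rw [hmapapp, ih (i + 1) (num + e) (alive ++ [e]) k, hlen, bOuter_eq]

-- ===== VERDICT (by name: the statement is the Claim_ definition above) =====
theorem solution_spec : Claim_equal_solution := by
  intro n k enemy _
  unfold Spec_solution solution solution_alt
  have := loop_eq_bOuter n enemy 0 0 [] k
  simpa using this
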